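-- pv_equiv track=rewrite | github.com/ArloL/music-stuff | scripts/lib_beatunes.py | _parse_h2_list_output
-- ===== SOURCE A (Python) =====
-- def _parse_h2_list_output(output: str) -> list[dict]:
--     """Parse H2 Shell list-mode output into a list of dicts.
--
--     List mode emits one KEY: VALUE pair per line, with blank lines
--     between rows and a "(N rows, ...)" trailer.
--     """
--     # Strip the interactive preamble (everything up to and including "sql> Result list mode is now on")
--     marker = "Result list mode is now on"
--     idx = output.find(marker)
--     if idx != -1:
--         output = output[idx + len(marker):]
--
--     rows = []
--     current: dict[str, str] = {}
--     for line in output.splitlines():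
--         line = line.removeprefix("sql> ").rstrip()
--         if line.startswith("(") or not line:
--             if current:
--                 rows.append(current)
--                 current = {}
--             continue
--         if ": " in line:
--             key, _, value = line.partition(": ")
--             current[key.strip().upper()] = value.strip()
--     if current:
--         rows.append(current)
--     return rows
-- ===== SOURCE B (Python) =====
-- from itertools import groupby
--
--
-- def _parse_h2_list_output(output: str) -> list[dict]:
--     """Parse H2 Shell list-mode output into a list of dicts (two-pass:
--     normalize lines, group them into row blocks, then map blocks to dicts)."""
--     marker = "Result list mode is now on"
--     idx = output.find(marker)
--     if idx != -1:
--         output = output[idx + len(marker):]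
--
--     def is_sep(line: str) -> bool:
--         return line.startswith("(") or not line
--
--     lines = [line.removeprefix("sql> ").rstrip() for line in output.splitlines()]
--     rows = []
--     for sep, block in groupby(lines, key=is_sep):
--         if sep:
--             continue
--         row = {}
--         for line in block:
--             if ": " in line:
--                 key, _, value = line.partition(": ")
--                 row[key.strip().upper()] = value.strip()
--         if row:
--             rows.append(row)
--     return rows
-- ===== Notes on version B (the rewrite author's own statement) =====
-- stated objective: alternative
-- what changed: A's single incremental loop carrying a current-row dict that is flushed at separator lines (and once after the loop) is replaced by a two-pass pipeline: normalize all lines, group them into row blocks at separator lines (itertools.groupby), then map each block to its dict and keep the non-empty ones.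
import Mathlib
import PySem

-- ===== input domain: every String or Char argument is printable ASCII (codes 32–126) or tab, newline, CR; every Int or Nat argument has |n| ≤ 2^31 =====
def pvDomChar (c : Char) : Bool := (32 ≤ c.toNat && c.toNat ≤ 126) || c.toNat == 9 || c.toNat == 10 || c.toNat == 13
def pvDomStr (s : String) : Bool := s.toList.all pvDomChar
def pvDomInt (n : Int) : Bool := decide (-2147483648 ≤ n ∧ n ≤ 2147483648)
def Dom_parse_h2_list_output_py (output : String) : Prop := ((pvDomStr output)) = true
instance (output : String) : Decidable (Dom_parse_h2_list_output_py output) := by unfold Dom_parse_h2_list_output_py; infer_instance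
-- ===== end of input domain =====

-- B replaces A's single incremental loop (carrying a current-row accumulator that is
-- flushed at separators and once more after the loop) by a two-pass pipeline:
-- normalize all lines, split them into row blocks at separator lines, map each block
-- to its dict and keep the non-empty ones.  Objective: alternative decomposition.

-- Helpers shared by both ports (they are line-for-line identical in both Pythons):
-- the preamble strip, line normalization ('sql> ' removeprefix + rstrip) and the
-- per-line dict update (partition on the first ': ', strip/upper, last-write-wins insert).
def pvMarker : List Char := "Result list mode is now on".toList

def pvStripPreamble (output : String) : List Char :=
  let cs := output.toList
  let idx := PySem.Chars.find cs pvMarker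
  if idx ≠ -1 then PySem.Chars.slice cs (some (idx + 26)) none else cs

-- line.removeprefix("sql> ").rstrip()
def pvNorm (line : List Char) : List Char :=
  PySem.Chars.rstrip
    (if PySem.Chars.startswith line "sql> ".toList then line.drop 5 else line)

-- if ": " in line: key, _, value = line.partition(": "); current[key.strip().upper()] = value.strip()
def pvUpd (cur : PySem.Dict String String) (line : List Char) : PySem.Dict String String :=
  if PySem.Chars.isIn ": ".toList line then
    let i := (PySem.Chars.find line ": ".toList).toNat
    cur.insert (String.ofList (PySem.Chars.upper (PySem.Chars.strip (line.take i))))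
               (String.ofList (PySem.Chars.strip (line.drop (i + 2))))
  else cur

-- line.startswith("(") or not line
def pvIsSep (line : List Char) : Bool :=
  PySem.Chars.startswith line ['('] || line.isEmpty

-- ===== PORT A =====
-- A's loop body, on the already-normalized line (A normalizes first thing in the body).
def pvStepA2 (st : List (PySem.Dict String String) × PySem.Dict String String)
    (line : List Char) : List (PySem.Dict String String) × PySem.Dict String String :=
  if pvIsSep line then
    if st.2.items.isEmpty then st else (st.1 ++ [st.2], PySem.Dict.empty)
  else (st.1, pvUpd st.2 line)

def pvStepA (st : List (PySem.Dict String String) × PySem.Dict String String)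
    (line0 : List Char) : List (PySem.Dict String String) × PySem.Dict String String :=
  pvStepA2 st (pvNorm line0)

def parse_h2_list_output_py (output : String) : List (List (String × String)) :=
  let cs := pvStripPreamble output
  let r := (PySem.Chars.splitlines cs).foldl pvStepA ([], PySem.Dict.empty)
  let rows := if r.2.items.isEmpty then r.1 else r.1 ++ [r.2]
  rows.map (·.items)

-- ===== PORT B =====
-- row = {…} built over one block of lines
def pvToDict (b : List (List Char)) : PySem.Dict String String :=
  b.foldl pvUpd PySem.Dict.empty

def parse_h2_list_output_py_alt (output : String) : List (List (String × String)) :=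
  let lines := (PySem.Chars.splitlines (pvStripPreamble output)).map pvNorm
  -- itertools.groupby on pvIsSep, keeping the non-separator groups ≡ splitOnP with
  -- the empty segments removed by the same non-empty-row filter below
  let rows := ((lines.splitOnP pvIsSep).map pvToDict).filter (fun d => !d.items.isEmpty)
  rows.map (·.items)

-- ===== PRECONDITION & SPEC =====
def Spec_parse_h2_list_output_py (output : String) (out : List (List (String × String))) : Prop := out = parse_h2_list_output_py_alt output
instance (output : String) (out : List (List (String × String))) : Decidable (Spec_parse_h2_list_output_py output out) := by unfold Spec_parse_h2_list_output_py; infer_instance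

-- ===== CLAIM (what is proved, stated in full; the proofs are below) =====
def Claim_equal_parse_h2_list_output_py : Prop := ∀ (output : String), Dom_parse_h2_list_output_py output → Spec_parse_h2_list_output_py output (parse_h2_list_output_py output)

-- ===== LEMMAS AND PROOFS =====

-- A's loop, written as recursion over the (normalized) line list.
def pvA2 : List (List Char) → PySem.Dict String String → List (PySem.Dict String String)
  | [], cur => if cur.items.isEmpty then [] else [cur]
  | l :: ls, cur =>
    if pvIsSep l then
      if cur.items.isEmpty then pvA2 ls cur else cur :: pvA2 ls PySem.Dict.empty
    else pvA2 ls (pvUpd cur l)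

-- B's block pipeline, with the first block folded from an arbitrary carried-in dict.
def pvBfrom : List (List (List Char)) → PySem.Dict String String → List (PySem.Dict String String)
  | [], _ => []
  | b :: bs, cur =>
    ((b.foldl pvUpd cur) :: bs.map pvToDict).filter (fun d => !d.items.isEmpty)

lemma pvEmpty_of_isEmpty {cur : PySem.Dict String String}
    (h : cur.items.isEmpty = true) : cur = PySem.Dict.empty := by
  apply PySem.Dict.ext
  simpa [List.isEmpty_iff, PySem.Dict.empty] using h

lemma pvFoldA_eq (ls : List (List Char)) :
    ∀ rows cur,
      (let r := ls.foldl pvStepA2 (rows, cur)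
       if r.2.items.isEmpty then r.1 else r.1 ++ [r.2]) = rows ++ pvA2 ls cur := by
  induction ls with
  | nil =>
    intro rows cur
    by_cases h : cur.items.isEmpty = true <;> simp [pvA2, h]
  | cons l ls ih =>
    intro rows cur
    by_cases hsep : pvIsSep l = true
    · by_cases hcur : cur.items.isEmpty = true
      · simpa [pvStepA2, hsep, hcur, pvA2] using ih rows cur
      · simpa [pvStepA2, hsep, hcur, pvA2] using ih (rows ++ [cur]) PySem.Dict.empty
    · simpa [pvStepA2, hsep, pvA2] using ih rows (pvUpd cur l)

lemma pvA2_eq_Bfrom (ls : List (List Char)) :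
    ∀ cur, pvA2 ls cur = pvBfrom (ls.splitOnP pvIsSep) cur := by
  induction ls with
  | nil =>
    intro cur
    by_cases h : cur.items.isEmpty = true <;>
      simp [pvA2, pvBfrom, List.splitOnP_nil, h]
  | cons l ls ih =>
    intro cur
    obtain ⟨b, bs, hbs⟩ : ∃ b bs, ls.splitOnP pvIsSep = b :: bs := by
      cases h : ls.splitOnP pvIsSep with
      | nil => exact absurd h (List.splitOnP_ne_nil _ _)
      | cons b bs => exact ⟨b, bs, rfl⟩
    by_cases hsep : pvIsSep l = true
    · rw [List.splitOnP_cons, if_pos hsep]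
      by_cases hcur : cur.items.isEmpty = true
      · have hce := pvEmpty_of_isEmpty hcur
        rw [pvA2, if_pos hsep, if_pos hcur, ih cur, hbs]
        simp [pvBfrom, hce, pvToDict, PySem.Dict.empty]
      · rw [pvA2, if_pos hsep, if_neg hcur, ih PySem.Dict.empty, hbs]
        simp [pvBfrom, hcur, pvToDict, PySem.Dict.empty]
    · rw [List.splitOnP_cons, if_neg hsep, pvA2, if_neg hsep, ih (pvUpd cur l), hbs]
      simp [pvBfrom, List.modifyHead]

-- ===== VERDICT (by name: the statement is the Claim_ definition above) =====
theorem parse_h2_list_output_py_spec : Claim_equal_parse_h2_list_output_py := by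
  intro output _
  unfold Spec_parse_h2_list_output_py parse_h2_list_output_py parse_h2_list_output_py_alt
  dsimp only
  have h1 := pvFoldA_eq ((PySem.Chars.splitlines (pvStripPreamble output)).map pvNorm)
    [] PySem.Dict.empty
  rw [List.foldl_map,
    show (fun (x : List (PySem.Dict String String) × PySem.Dict String String)
        (y : List Char) => pvStepA2 x (pvNorm y)) = pvStepA from rfl] at h1
  obtain ⟨b, bs, hbs⟩ : ∃ b bs,
      (((PySem.Chars.splitlines (pvStripPreamble output)).map pvNorm).splitOnP pvIsSep)
        = b :: bs := by
    cases h : ((PySem.Chars.splitlines (pvStripPreamble output)).map pvNorm).splitOnP pvIsSep with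
    | nil => exact absurd h (List.splitOnP_ne_nil _ _)
    | cons b bs => exact ⟨b, bs, rfl⟩
  rw [h1, pvA2_eq_Bfrom, hbs]
  simp [pvBfrom, pvToDict]
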